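-- pv_equiv track=rewrite | github.com/Maitooxn/Portfolio | projects/mini-jeux/colorlines.py | detections_verticales
-- ===== SOURCE A (Python) =====
-- def detections_verticales(M):
--     """Renvoie, pour chacune des colonnes, les coordonnées des cases contenues
--     dans une sous-colonne de taille au moins 5."""
--     a_retirer = set()
--     for j in range(len(M[0])):  # Parcourir les colonnes
--         compteur = 1
--         for i in range(1, len(M)):
--             if M[i][j] is not None and M[i][j] == M[i - 1][j]:
--                 compteur += 1
--             else:
--                 if compteur >= 5:
--                     a_retirer.update({(k, j) for k in range(i - compteur, i)})
--                 compteur = 1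
--         if compteur >= 5:
--             a_retirer.update({(k, j) for k in range(len(M) - compteur, len(M))})
--     return a_retirer
-- ===== SOURCE B (Python) =====
-- def detections_verticales(M):
--     """Renvoie, pour chacune des colonnes, les coordonnees des cases contenues
--     dans une sous-colonne de taille au moins 5."""
--     n = len(M)
--
--     def fenetre_ok(s, j):
--         # window of 5 equal non-None cells starting at row s of column j
--         return (0 <= s and s + 5 <= n and M[s][j] is not None
--                 and all(M[s + t][j] == M[s][j] for t in range(1, 5)))
--
--     return {(i, j)
--             for j in range(len(M[0]))
--             for i in range(n)
--             if any(fenetre_ok(s, j) for s in range(i - 4, i + 1))}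
-- ===== Notes on version B (the rewrite author's own statement) =====
-- stated objective: alternative
-- what changed: B replaces A's streaming run-length counter with a declarative per-cell test: a cell belongs to the result iff some 5-cell window of equal non-None values contains it, so B enumerates windows instead of maintaining run state.
-- outside the precondition, e.g. on detections_verticales([]): A raises IndexError, B raises IndexError; on detections_verticales([[None, None], [None]]): A raises IndexError, B returns set()
import Mathlib
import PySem

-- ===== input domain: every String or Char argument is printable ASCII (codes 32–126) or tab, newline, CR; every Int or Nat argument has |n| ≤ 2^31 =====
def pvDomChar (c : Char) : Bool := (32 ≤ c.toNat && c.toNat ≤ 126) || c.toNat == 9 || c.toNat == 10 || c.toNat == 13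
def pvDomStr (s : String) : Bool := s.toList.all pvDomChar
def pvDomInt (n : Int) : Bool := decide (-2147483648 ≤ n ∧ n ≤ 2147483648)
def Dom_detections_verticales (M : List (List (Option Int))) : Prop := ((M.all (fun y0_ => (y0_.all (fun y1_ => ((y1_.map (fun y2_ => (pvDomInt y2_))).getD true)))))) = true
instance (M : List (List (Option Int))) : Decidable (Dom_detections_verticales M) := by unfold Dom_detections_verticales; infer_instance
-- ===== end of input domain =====

-- B drops A's streaming run-length counter: a cell is in the result iff some 5-cell window of
-- equal non-None values contains it, so B tests each cell against the windows declaratively.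

-- ===== PORT A =====
def detections_verticales (M : List (List (Option Int))) : List (Int × Int) :=
  (PySem.List.pyRange 0 ((PySem.List.pyGetD M 0 []).length : Int) 1).foldl
    (fun a_retirer j =>
      let p := (PySem.List.pyRange 1 (M.length : Int) 1).foldl
        (fun (p : PySem.Set (Int × Int) × Int) i =>
          let v := PySem.List.pyGetD (PySem.List.pyGetD M i []) j none
          let w := PySem.List.pyGetD (PySem.List.pyGetD M (i - 1) []) j none
          if v ≠ none ∧ v = w then (p.1, p.2 + 1)
          else
            (if 5 ≤ p.2 then
                PySem.Set.update p.1 ((PySem.List.pyRange (i - p.2) i 1).map (fun k => (k, j)))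
              else p.1, 1))
        (a_retirer, 1)
      if 5 ≤ p.2 then
        PySem.Set.update p.1
          ((PySem.List.pyRange ((M.length : Int) - p.2) (M.length : Int) 1).map (fun k => (k, j)))
      else p.1)
    PySem.Set.empty

-- ===== PORT B =====
-- 'fenetre_ok(s, j)': a window of 5 equal non-None cells starts at row s of column j
-- (the Lean && needs no short-circuit guard: pyGetD is total, and an out-of-bounds s
-- makes the bound conjuncts false exactly as Python's short-circuiting 'and' does).
def fenetreOk (M : List (List (Option Int))) (n s j : Int) : Bool :=
  decide (0 ≤ s) && decide (s + 5 ≤ n) &&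
  decide (PySem.List.pyGetD (PySem.List.pyGetD M s []) j none ≠ none) &&
  (PySem.List.pyRange 1 5 1).all (fun t =>
    PySem.List.pyGetD (PySem.List.pyGetD M (s + t) []) j none
      == PySem.List.pyGetD (PySem.List.pyGetD M s []) j none)

def detections_verticales_alt (M : List (List (Option Int))) : List (Int × Int) :=
  let n : Int := (M.length : Int)
  (PySem.List.pyRange 0 ((PySem.List.pyGetD M 0 []).length : Int) 1).foldl
    (fun res j =>
      (PySem.List.pyRange 0 n 1).foldl
        (fun res i =>
          if (PySem.List.pyRange (i - 4) (i + 1) 1).any (fun s => fenetreOk M n s j)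
          then PySem.Set.add res (i, j) else res)
        res)
    PySem.Set.empty

-- ===== PRECONDITION & SPEC =====
-- Pre_ excludes exactly the inputs where Python A raises IndexError: the empty grid (M[0])
-- and ragged grids with a row shorter than row 0 (M[i][j]).
def Pre_detections_verticales (M : List (List (Option Int))) : Prop :=
  M ≠ [] ∧ ∀ row ∈ M, (M.headD []).length ≤ row.length
instance (M : List (List (Option Int))) : Decidable (Pre_detections_verticales M) := by
  unfold Pre_detections_verticales; infer_instance

def pvWitness_detections_verticales : List (List (Option Int)) :=
  [[some 1], [some 1], [some 1], [some 1], [some 1], [some 2]]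

def Spec_detections_verticales (M : List (List (Option Int))) (out : List (Int × Int)) : Prop := out = detections_verticales_alt M
instance (M : List (List (Option Int))) (out : List (Int × Int)) : Decidable (Spec_detections_verticales M out) := by unfold Spec_detections_verticales; infer_instance

-- ===== CLAIM (what is proved, stated in full; the proofs are below) =====
def Claim_equal_detections_verticales : Prop := ∀ (M : List (List (Option Int))), Dom_detections_verticales M → Pre_detections_verticales M → Spec_detections_verticales M (detections_verticales M)

-- ===== LEMMAS AND PROOFS =====

-- ---- proof-side reference machinery: a per-column maximal-run scanner ----
-- length of the run continuing value v
def countRun (v : Option Int) : List (Option Int) → Nat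
  | [] => 0
  | x :: t => if x = v then 1 + countRun v t else 0

-- consume one maximal run at a time, flushing qualifying runs wholesale
def scanCol (j : Int) : Int → List (Option Int) → PySem.Set (Int × Int) → PySem.Set (Int × Int)
  | _, [], s => s
  | i, x :: t, s =>
      let m : Nat := 1 + countRun x t
      let s' := if x ≠ none ∧ 5 ≤ m then
          PySem.Set.update s ((PySem.List.pyRange i (i + (m : Int)) 1).map (fun r => (r, j)))
        else s
      scanCol j (i + (m : Int)) (t.drop (countRun x t)) s'
  termination_by _ l _ => l.length
  decreasing_by simp

-- A's inner index loop, rewritten over the extracted column and turned into a recursion that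
-- carries (previous value, current index, (set, counter)).
def stepA (j : Int) (col : List (Option Int))
    (p : PySem.Set (Int × Int) × Int) (i : Int) : PySem.Set (Int × Int) × Int :=
  let v := PySem.List.pyGetD col i none
  let w := PySem.List.pyGetD col (i - 1) none
  if v ≠ none ∧ v = w then (p.1, p.2 + 1)
  else
    (if 5 ≤ p.2 then
        PySem.Set.update p.1 ((PySem.List.pyRange (i - p.2) i 1).map (fun k => (k, j)))
      else p.1, 1)

def loopA (j : Int) : Option Int → Int → PySem.Set (Int × Int) × Int → List (Option Int) →
    PySem.Set (Int × Int) × Int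
  | _, _, sc, [] => sc
  | v, i, (s, c), x :: t =>
      if x ≠ none ∧ x = v then loopA j x (i + 1) (s, c + 1) t
      else loopA j x (i + 1)
        (if 5 ≤ c then
            PySem.Set.update s ((PySem.List.pyRange (i - c) i 1).map (fun k => (k, j)))
          else s, 1) t

lemma countRun_replicate_append (v : Option Int) (k : Nat) (t : List (Option Int)) :
    countRun v (List.replicate k v ++ t) = k + countRun v t := by
  induction k with
  | zero => simp
  | succ n ih => simp [List.replicate_succ, countRun, ih]; omega

lemma countRun_replicate (v : Option Int) (k : Nat) :
    countRun v (List.replicate k v) = k := by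
  simpa using countRun_replicate_append v k []

lemma scan_none_merge (j i : Int) (t : List (Option Int)) (s : PySem.Set (Int × Int)) :
    scanCol j (i - 1) (none :: none :: t) s = scanCol j i (none :: t) s := by
  rw [scanCol, scanCol]
  simp only [countRun, ne_eq, not_true_eq_false, false_and, ite_false, if_true]
  rw [Nat.add_comm 1 (countRun none t), List.drop_succ_cons]
  congr 1
  push_cast
  ring

lemma Lrun (j : Int) : ∀ (t : List (Option Int)) (v : Option Int) (i c : Int)
    (s : PySem.Set (Int × Int)), 1 ≤ c → (v = none → c = 1) →
    (let sc := loopA j v i (s, c) t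
     if 5 ≤ sc.2 then
        PySem.Set.update sc.1
          ((PySem.List.pyRange (i + (t.length : Int) - sc.2) (i + (t.length : Int)) 1).map
            (fun k => (k, j)))
      else sc.1)
    = scanCol j (i - c) (List.replicate c.toNat v ++ t) s := by
  intro t
  induction t with
  | nil =>
    intro v i c s hc hvc
    have hk : c.toNat = (c.toNat - 1) + 1 := by omega
    set k := c.toNat - 1 with hkdef
    rw [List.append_nil, hk, List.replicate_succ, scanCol]
    simp only [countRun_replicate, loopA, List.length_nil, Nat.cast_zero, add_zero,
      List.drop_replicate, Nat.sub_self, List.replicate_zero, scanCol]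
    have h1 : i - c + ((1 + k : Nat) : Int) = i := by push_cast; omega
    rw [h1]
    by_cases hv : v = none
    · have hc1 : c = 1 := hvc hv
      rw [if_neg (by omega), if_neg (by rintro ⟨h, h5⟩; omega)]
    · by_cases h5 : 5 ≤ c
      · rw [if_pos h5, if_pos ⟨hv, by omega⟩]
      · rw [if_neg h5, if_neg (by rintro ⟨h, h5'⟩; omega)]
  | cons x t' ih =>
    intro v i c s hc hvc
    by_cases hcond : x ≠ none ∧ x = v
    · obtain ⟨hxn, hxv⟩ := hcond
      subst hxv
      simp only [loopA]
      rw [if_pos (show x ≠ none ∧ True from ⟨hxn, trivial⟩)]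
      have hlen : i + ((x :: t').length : Int) = (i + 1) + (t'.length : Int) := by
        simp [List.length_cons]; ring
      rw [hlen]
      have hrep : List.replicate c.toNat x ++ x :: t' = List.replicate (c + 1).toNat x ++ t' := by
        have h2 : (c + 1).toNat = c.toNat + 1 := by omega
        rw [h2, List.replicate_succ', List.append_assoc, List.singleton_append]
      rw [hrep]
      have h3 : i - c = (i + 1) - (c + 1) := by ring
      rw [h3]
      exact ih x (i + 1) (c + 1) s (by omega) (fun h => absurd h hxn)
    · have hlen : i + ((x :: t').length : Int) = (i + 1) + (t'.length : Int) := by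
        simp [List.length_cons]; ring
      by_cases hxv : x = v
      · have hxn : x = none := by
          by_contra hxn; exact hcond ⟨hxn, hxv⟩
        have hvn : v = none := hxv ▸ hxn
        have hc1 : c = 1 := hvc hvn
        subst hc1; subst hvn; subst hxn
        simp only [loopA, ne_eq, not_true_eq_false, false_and, if_false, if_neg (by omega : ¬ (5:Int) ≤ 1)]
        rw [hlen]
        have := ih none (i + 1) 1 s (by omega) (fun _ => rfl)
        simp only [Int.toNat_one, List.replicate_one, List.singleton_append] at this ⊢
        rw [this]
        have h4 : (i + 1) - 1 = i := by ring
        rw [h4]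
        exact (scan_none_merge j i t' s).symm
      · simp only [loopA]
        rw [if_neg (show ¬(x ≠ none ∧ x = v) from fun h => hxv h.2)]
        rw [hlen]
        have := ih x (i + 1) 1
          (if 5 ≤ c then
              PySem.Set.update s ((PySem.List.pyRange (i - c) i 1).map (fun k => (k, j)))
            else s) (by omega) (fun _ => rfl)
        simp only [Int.toNat_one, List.replicate_one, List.singleton_append] at this
        rw [this]
        have h4 : (i + 1) - 1 = i := by ring
        rw [h4]
        have hk : c.toNat = (c.toNat - 1) + 1 := by omega
        set k := c.toNat - 1 with hkdef
        rw [hk, List.replicate_succ, List.cons_append]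
        have hcr : countRun v (List.replicate k v ++ x :: t') = k := by
          rw [countRun_replicate_append]
          simp [countRun, hxv]
        have hdrop : List.drop k (List.replicate k v ++ x :: t') = x :: t' := by
          have h := List.drop_left (l₁ := List.replicate k v) (l₂ := x :: t')
          rwa [List.length_replicate] at h
        conv_rhs => rw [scanCol]
        simp only [hcr, hdrop]
        have h1 : i - c + ((1 + k : Nat) : Int) = i := by push_cast; omega
        rw [h1]
        congr 1
        by_cases hv : v = none
        · have hc1 : c = 1 := hvc hv
          rw [if_neg (by omega), if_neg (by rintro ⟨h, h5⟩; omega)]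
        · by_cases h5 : 5 ≤ c
          · rw [if_pos h5, if_pos ⟨hv, by omega⟩]
          · rw [if_neg h5, if_neg (by rintro ⟨h, h5'⟩; omega)]

lemma B1 (j : Int) (col : List (Option Int)) : ∀ (d : List (Option Int)) (a : Int)
    (sc : PySem.Set (Int × Int) × Int), 1 ≤ a → col.drop a.toNat = d →
    (PySem.List.pyRange a (col.length : Int) 1).foldl (stepA j col) sc
    = loopA j (PySem.List.pyGetD col (a - 1) none) a sc d := by
  intro d
  induction d with
  | nil =>
    intro a sc ha hd
    have hlen : (col.length : Int) ≤ a := by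
      have := List.drop_eq_nil_iff.mp hd
      omega
    rw [PySem.List.pyRange_one_eq_nil hlen]
    simp [loopA]
  | cons x d' ih =>
    intro a sc ha hd
    have hlt : a.toNat < col.length := by
      by_contra h
      rw [List.drop_eq_nil_of_le (by omega)] at hd
      simp at hd
    have hxget : col[a.toNat]? = some x := by
      have h0 : (col.drop a.toNat)[0]? = some x := by rw [hd]; rfl
      rwa [List.getElem?_drop, Nat.add_zero] at h0
    have hx : PySem.List.pyGetD col a none = x := by
      rw [PySem.List.pyGetD_eq_getElem col none (by omega) (by omega)]
      have := List.getElem?_eq_getElem hlt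
      rw [this] at hxget
      exact Option.some.inj hxget
    have hd' : col.drop (a + 1).toNat = d' := by
      have : (a + 1).toNat = a.toNat + 1 := by omega
      rw [this, ← List.tail_drop, hd]
      rfl
    have halt : a < (col.length : Int) := by omega
    rw [PySem.List.pyRange_one_cons halt, List.foldl_cons]
    have hstep := ih (a + 1) (stepA j col sc a) (by omega) hd'
    have hsimp : a + 1 - 1 = a := by ring
    rw [hsimp] at hstep
    rw [hstep]
    obtain ⟨s, c⟩ := sc
    simp only [loopA, stepA, hx]
    by_cases hcnd : x ≠ none ∧ x = PySem.List.pyGetD col (a - 1) none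
    · rw [if_pos hcnd, if_pos hcnd]
    · rw [if_neg hcnd, if_neg hcnd]

lemma colEq (j : Int) (col : List (Option Int)) (h : col ≠ [])
    (s : PySem.Set (Int × Int)) :
    (let p := (PySem.List.pyRange 1 (col.length : Int) 1).foldl (stepA j col) (s, 1)
     if 5 ≤ p.2 then
        PySem.Set.update p.1
          ((PySem.List.pyRange ((col.length : Int) - p.2) (col.length : Int) 1).map
            (fun k => (k, j)))
      else p.1)
    = scanCol j 0 col s := by
  cases col with
  | nil => exact absurd rfl h
  | cons x t =>
    have hB := B1 j (x :: t) t 1 (s, 1) (by omega) (by simp)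
    have hx0 : PySem.List.pyGetD (x :: t) (1 - 1) none = x := by
      norm_num [PySem.List.pyGetD_zero_cons]
    rw [hx0] at hB
    have hL := Lrun j t x 1 1 s (by omega) (fun _ => rfl)
    simp only [Int.toNat_one, List.replicate_one, List.singleton_append] at hL
    norm_num at hL
    have hlen : ((t.length + 1 : Nat) : Int) = 1 + (t.length : Int) := by push_cast; ring
    simp only [List.length_cons, hlen] at hB ⊢
    rw [hB]
    exact hL

lemma colGet (M : List (List (Option Int))) (j i : Int) (h0 : 0 ≤ i)
    (h1 : i < (M.length : Int)) :
    PySem.List.pyGetD (PySem.List.pyGetD M i []) j none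
    = PySem.List.pyGetD (M.map (fun row => PySem.List.pyGetD row j none)) i none := by
  rw [PySem.List.pyGetD_eq_getElem M [] h0 h1,
    PySem.List.pyGetD_eq_getElem (M.map (fun row => PySem.List.pyGetD row j none)) none h0
      (by simpa using h1)]
  simp

-- ---- bridge: the run scanner equals B's per-cell window test, column by column ----
-- fenetreOk read over the extracted column
def wOk (col : List (Option Int)) (s : Int) : Bool :=
  decide (0 ≤ s) && decide (s + 5 ≤ (col.length : Int)) &&
  decide (PySem.List.pyGetD col s none ≠ none) &&
  (PySem.List.pyRange 1 5 1).all (fun t =>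
    PySem.List.pyGetD col (s + t) none == PySem.List.pyGetD col s none)

-- B's per-cell condition over the extracted column
def Qb (col : List (Option Int)) (r : Int) : Bool :=
  (PySem.List.pyRange (r - 4) (r + 1) 1).any (fun s => wOk col s)

lemma pyRange15 : PySem.List.pyRange 1 5 1 = [1, 2, 3, 4] := by decide

lemma fenetreOk_eq_wOk (M : List (List (Option Int))) (j s : Int) :
    fenetreOk M (M.length : Int) s j
    = wOk (M.map (fun row => PySem.List.pyGetD row j none)) s := by
  unfold fenetreOk wOk
  rw [pyRange15]
  simp only [List.all_cons, List.all_nil, Bool.and_true]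
  by_cases h0 : 0 ≤ s
  · by_cases h5 : s + 5 ≤ (M.length : Int)
    · have hlen : ((M.map (fun row => PySem.List.pyGetD row j none)).length : Int)
          = (M.length : Int) := by simp
      rw [hlen]
      have hcg : ∀ u : Int, 0 ≤ u → u < s + 5 →
          PySem.List.pyGetD (PySem.List.pyGetD M u []) j none
          = PySem.List.pyGetD (M.map (fun row => PySem.List.pyGetD row j none)) u none := by
        intro u hu1 hu2
        exact colGet M j u hu1 (by omega)
      rw [hcg s h0 (by omega), hcg (s + 1) (by omega) (by omega),
        hcg (s + 2) (by omega) (by omega), hcg (s + 3) (by omega) (by omega),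
        hcg (s + 4) (by omega) (by omega)]
    · have hlen : ((M.map (fun row => PySem.List.pyGetD row j none)).length : Int)
          = (M.length : Int) := by simp
      rw [hlen]
      simp [h5]
  · simp [h0]

lemma pyGetD_some (col : List (Option Int)) (i : Int) (h0 : 0 ≤ i)
    (h1 : i < (col.length : Int)) :
    col[i.toNat]? = some (PySem.List.pyGetD col i none) := by
  rw [PySem.List.pyGetD_eq_getElem col none h0 h1]
  exact List.getElem?_eq_getElem (by omega)

lemma wOk_iff (col : List (Option Int)) (s : Int) :
    wOk col s = true ↔
      0 ≤ s ∧ s + 5 ≤ (col.length : Int) ∧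
      ∃ v : Option Int, v ≠ none ∧ ∀ t : Nat, t < 5 → col[s.toNat + t]? = some v := by
  unfold wOk
  rw [pyRange15]
  simp only [List.all_cons, List.all_nil, Bool.and_true, Bool.and_eq_true,
    decide_eq_true_eq, beq_iff_eq]
  constructor
  · rintro ⟨⟨⟨h0, h5⟩, hv⟩, h1, h2, h3, h4⟩
    refine ⟨h0, h5, PySem.List.pyGetD col s none, hv, ?_⟩
    have heq : ∀ t : Nat, t < 5 →
        PySem.List.pyGetD col (s + (t : Int)) none = PySem.List.pyGetD col s none := by
      intro t ht
      interval_cases t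
      · norm_num
      · exact_mod_cast h1
      · exact_mod_cast h2
      · exact_mod_cast h3
      · exact_mod_cast h4
    intro t ht
    have hg := pyGetD_some col (s + (t : Int)) (by omega) (by omega)
    rw [heq t ht] at hg
    rwa [show (s + (t : Int)).toNat = s.toNat + t by omega] at hg
  · rintro ⟨h0, h5, v, hv, hwin⟩
    have hval : ∀ t : Nat, t < 5 → PySem.List.pyGetD col (s + (t : Int)) none = v := by
      intro t ht
      have hg := pyGetD_some col (s + (t : Int)) (by omega) (by omega)
      rw [show (s + (t : Int)).toNat = s.toNat + t by omega, hwin t ht] at hg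
      exact (Option.some.inj hg).symm
    have hs0 : PySem.List.pyGetD col s none = v := by
      have := hval 0 (by omega)
      simpa using this
    refine ⟨⟨⟨h0, h5⟩, by rw [hs0]; exact hv⟩, ?_, ?_, ?_, ?_⟩
    · rw [hs0]; exact_mod_cast hval 1 (by omega)
    · rw [hs0]; exact_mod_cast hval 2 (by omega)
    · rw [hs0]; exact_mod_cast hval 3 (by omega)
    · rw [hs0]; exact_mod_cast hval 4 (by omega)

lemma countRun_le (v : Option Int) (t : List (Option Int)) : countRun v t ≤ t.length := by
  induction t with
  | nil => simp [countRun]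
  | cons x t ih => by_cases h : x = v <;> simp [countRun, h] <;> omega

lemma countRun_cons_self (v : Option Int) (t : List (Option Int)) :
    countRun v (v :: t) = 1 + countRun v t := by
  simp [countRun]

lemma countRun_lt (v : Option Int) (t : List (Option Int)) :
    ∀ k, k < countRun v t → t[k]? = some v := by
  induction t with
  | nil => simp [countRun]
  | cons x t ih =>
    intro k hk
    by_cases h : x = v
    · subst h
      rw [countRun_cons_self] at hk
      cases k with
      | zero => rfl
      | succ k' => simpa using ih k' (by omega)
    · simp [countRun, h] at hk

lemma countRun_get (v : Option Int) (t : List (Option Int)) :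
    t[countRun v t]? ≠ some v := by
  induction t with
  | nil => simp
  | cons x t ih =>
    by_cases h : x = v
    · subst h
      rw [countRun_cons_self, Nat.add_comm]
      simpa using ih
    · simpa [countRun, h] using h

lemma runQ (col : List (Option Int)) (x : Option Int) (i m : Nat) (hm : 1 ≤ m)
    (hrun : ∀ k, k < m → col[i + k]? = some x)
    (hend : col[i + m]? ≠ some x)
    (hstart : i = 0 ∨ col[i - 1]? ≠ col[i]?)
    (r : Int) (hr1 : (i : Int) ≤ r) (hr2 : r < (i : Int) + (m : Int)) :
    (Qb col r = true) ↔ (x ≠ none ∧ 5 ≤ m) := by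
  have hlast := hrun (m - 1) (by omega)
  have hmlen : i + m ≤ col.length := by
    have := (List.getElem?_eq_some_iff.mp hlast).1
    omega
  constructor
  · intro hq
    unfold Qb at hq
    rw [List.any_eq_true] at hq
    obtain ⟨s0, hmem, hw⟩ := hq
    obtain ⟨hs1, hs2⟩ := PySem.List.mem_pyRange_one.mp hmem
    obtain ⟨h0, h5, v, hv, hwin⟩ := (wOk_iff col s0).mp hw
    have hi_le : (i : Int) ≤ s0 := by
      by_contra hlt
      push_neg at hlt
      have hi1 : 1 ≤ i := by omega
      have ht1 := hwin (i - 1 - s0.toNat) (by omega)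
      have ht2 := hwin (i - s0.toNat) (by omega)
      rw [show s0.toNat + (i - 1 - s0.toNat) = i - 1 by omega] at ht1
      rw [show s0.toNat + (i - s0.toNat) = i by omega] at ht2
      rcases hstart with h | h
      · omega
      · exact h (ht1.trans ht2.symm)
    have hwin_le : s0 + 5 ≤ (i : Int) + m := by
      by_contra hgt
      push_neg at hgt
      have ht1 := hwin (i + m - 1 - s0.toNat) (by omega)
      have ht2 := hwin (i + m - s0.toNat) (by omega)
      rw [show s0.toNat + (i + m - 1 - s0.toNat) = i + (m - 1) by omega] at ht1
      rw [show s0.toNat + (i + m - s0.toNat) = i + m by omega] at ht2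
      rw [hlast] at ht1
      exact hend (ht2.trans (by rw [Option.some.inj ht1]))
    have hxv : x = v := by
      have h1 := hrun (s0.toNat - i) (by omega)
      rw [show i + (s0.toNat - i) = s0.toNat by omega] at h1
      have h2 := hwin 0 (by omega)
      rw [Nat.add_zero] at h2
      rw [h1] at h2
      exact Option.some.inj h2
    exact ⟨hxv ▸ hv, by omega⟩
  · rintro ⟨hx, h5⟩
    unfold Qb
    rw [List.any_eq_true]
    refine ⟨min r ((i : Int) + (m : Int) - 5),
      PySem.List.mem_pyRange_one.mpr ⟨by omega, by omega⟩, ?_⟩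
    rw [wOk_iff]
    refine ⟨by omega, by omega, x, hx, ?_⟩
    intro t ht
    have hk := hrun ((min r ((i : Int) + (m : Int) - 5)).toNat + t - i) (by omega)
    rwa [show i + ((min r ((i : Int) + (m : Int) - 5)).toNat + t - i)
        = (min r ((i : Int) + (m : Int) - 5)).toNat + t by omega] at hk

lemma foldl_id {α β : Type} (l : List β) (s : α) : l.foldl (fun acc _ => acc) s = s := by
  induction l generalizing s with
  | nil => rfl
  | cons x t ih => simpa using ih s

lemma scanEq (j : Int) (col : List (Option Int)) :
    ∀ (l : List (Option Int)) (i : Nat), col.drop i = l →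
      (i = 0 ∨ col[i - 1]? ≠ col[i]?) →
      ∀ s, scanCol j (i : Int) l s
        = (PySem.List.pyRange (i : Int) (col.length : Int) 1).foldl
            (fun acc r => if Qb col r then PySem.Set.add acc (r, j) else acc) s := by
  suffices main : ∀ (N : Nat) (l : List (Option Int)) (i : Nat), l.length ≤ N →
      col.drop i = l → (i = 0 ∨ col[i - 1]? ≠ col[i]?) →
      ∀ s, scanCol j (i : Int) l s
        = (PySem.List.pyRange (i : Int) (col.length : Int) 1).foldl
            (fun acc r => if Qb col r then PySem.Set.add acc (r, j) else acc) s by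
    intro l i hd hb s
    exact main l.length l i le_rfl hd hb s
  intro N
  induction N with
  | zero =>
    intro l i hN hd hb s
    have hl : l = [] := List.eq_nil_of_length_eq_zero (by omega)
    subst hl
    have hge : col.length ≤ i := by
      have := List.drop_eq_nil_iff.mp hd
      omega
    rw [scanCol, PySem.List.pyRange_one_eq_nil (by exact_mod_cast hge)]
    rfl
  | succ N ih =>
    intro l i hN hd hb s
    cases l with
    | nil =>
      have hge : col.length ≤ i := by
        have := List.drop_eq_nil_iff.mp hd
        omega
      rw [scanCol, PySem.List.pyRange_one_eq_nil (by exact_mod_cast hge)]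
      rfl
    | cons x t =>
      set c := countRun x t with hc
      have hlen_col : col.length = i + (t.length + 1) := by
        have h1 := congrArg List.length hd
        have h2 : i < col.length := by
          by_contra h
          rw [List.drop_eq_nil_of_le (by omega)] at hd
          simp at hd
        simp [List.length_drop] at h1
        omega
      have hxi : col[i]? = some x := by
        have h0 : (col.drop i)[0]? = some x := by rw [hd]; rfl
        rwa [List.getElem?_drop, Nat.add_zero] at h0
      have hrun : ∀ k, k < 1 + c → col[i + k]? = some x := by
        intro k hk
        cases k with
        | zero => simpa using hxi
        | succ k' =>
          have ht := countRun_lt x t k' (by omega)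
          have h0 : (col.drop i)[k' + 1]? = some x := by rw [hd]; simpa using ht
          rwa [List.getElem?_drop] at h0
      have hend : col[i + (1 + c)]? ≠ some x := by
        have ht := countRun_get x t
        have h0 : (col.drop i)[c + 1]? = t[c]? := by rw [hd]; simp
        rw [List.getElem?_drop] at h0
        rw [show i + (1 + c) = i + (c + 1) by omega, h0]
        exact ht
      have hcle : c ≤ t.length := countRun_le x t
      rw [scanCol]
      rw [PySem.List.pyRange_one_append (i : Int) ((i : Int) + ((1 + c : Nat) : Int))
        (col.length : Int) (by push_cast; omega) (by push_cast; omega)]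
      rw [List.foldl_append]
      have hseg : (PySem.List.pyRange (i : Int) ((i : Int) + ((1 + c : Nat) : Int)) 1).foldl
            (fun acc r => if Qb col r then PySem.Set.add acc (r, j) else acc) s
          = (if x ≠ none ∧ 5 ≤ 1 + c then
              PySem.Set.update s
                ((PySem.List.pyRange (i : Int) ((i : Int) + ((1 + c : Nat) : Int)) 1).map
                  (fun r => (r, j)))
            else s) := by
        by_cases hcase : x ≠ none ∧ 5 ≤ 1 + c
        · rw [if_pos hcase, PySem.Set.update_map_eq_foldl_add]
          apply PySem.List.foldl_congr_mem
          intro acc r hr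
          obtain ⟨h1, h2⟩ := PySem.List.mem_pyRange_one.mp hr
          rw [if_pos ((runQ col x i (1 + c) (by omega) hrun hend hb r h1
            (by push_cast at h2 ⊢; omega)).mpr hcase)]
        · rw [if_neg hcase]
          have hz : (PySem.List.pyRange (i : Int) ((i : Int) + ((1 + c : Nat) : Int)) 1).foldl
                (fun acc r => if Qb col r then PySem.Set.add acc (r, j) else acc) s
              = (PySem.List.pyRange (i : Int) ((i : Int) + ((1 + c : Nat) : Int)) 1).foldl
                (fun acc (_ : Int) => acc) s := by
            apply PySem.List.foldl_congr_mem
            intro acc r hr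
            obtain ⟨h1, h2⟩ := PySem.List.mem_pyRange_one.mp hr
            rw [if_neg (fun hq => hcase ((runQ col x i (1 + c) (by omega) hrun hend hb r h1
              (by push_cast at h2 ⊢; omega)).mp hq))]
          rw [hz]
          exact foldl_id _ s
      have hd' : col.drop (i + (1 + c)) = t.drop c := by
        have : col.drop (i + (1 + c)) = (col.drop i).drop (1 + c) := by
          rw [List.drop_drop]
        rw [this, hd]
        simp [Nat.add_comm]
      have hb' : (i + (1 + c)) = 0 ∨ col[i + (1 + c) - 1]? ≠ col[i + (1 + c)]? := by
        right
        rw [show i + (1 + c) - 1 = i + c by omega, hrun c (by omega)]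
        exact Ne.symm hend
      have hih := ih (t.drop c) (i + (1 + c)) (by simp at hN ⊢; omega) hd' hb'
      have hcast : ((i + (1 + c) : Nat) : Int) = (i : Int) + ((1 + c : Nat) : Int) := by
        push_cast; ring
      rw [hcast] at hih
      rw [hseg]
      exact hih _

-- ===== VERDICT (by name: the statement is the Claim_ definition above) =====
theorem detections_verticales_spec : Claim_equal_detections_verticales := by
  intro M _ hpre
  unfold Spec_detections_verticales detections_verticales detections_verticales_alt
  apply PySem.List.foldl_congr_mem
  intro acc j hj
  obtain ⟨hj0, hjlt⟩ := PySem.List.mem_pyRange_one.mp hj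
  have hMne : M ≠ [] := hpre.1
  set col := M.map (fun row => PySem.List.pyGetD row j none) with hcoldef
  have hclen : ((col.length : Int)) = (M.length : Int) := by simp [hcoldef]
  -- A side = scanCol
  have hinner : ∀ (p : PySem.Set (Int × Int) × Int),
      (PySem.List.pyRange 1 (M.length : Int) 1).foldl
        (fun (p : PySem.Set (Int × Int) × Int) i =>
          let v := PySem.List.pyGetD (PySem.List.pyGetD M i []) j none
          let w := PySem.List.pyGetD (PySem.List.pyGetD M (i - 1) []) j none
          if v ≠ none ∧ v = w then (p.1, p.2 + 1)
          else
            (if 5 ≤ p.2 then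
                PySem.Set.update p.1 ((PySem.List.pyRange (i - p.2) i 1).map (fun k => (k, j)))
              else p.1, 1)) p
      = (PySem.List.pyRange 1 (M.length : Int) 1).foldl (stepA j col) p := by
    intro p
    apply PySem.List.foldl_congr_mem
    intro q i hi
    obtain ⟨hi1, hi2⟩ := PySem.List.mem_pyRange_one.mp hi
    simp only [stepA]
    rw [colGet M j i (by omega) hi2, colGet M j (i - 1) (by omega) (by omega)]
  simp only [hinner]
  have hcol : col ≠ [] := by simpa [hcoldef] using hMne
  have hA := colEq j col hcol acc
  rw [hclen] at hA
  rw [hA]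
  -- B side = per-cell fold with Qb
  have hB : (PySem.List.pyRange 0 (M.length : Int) 1).foldl
        (fun res i =>
          if (PySem.List.pyRange (i - 4) (i + 1) 1).any (fun s => fenetreOk M (M.length : Int) s j)
          then PySem.Set.add res (i, j) else res) acc
      = (PySem.List.pyRange 0 (M.length : Int) 1).foldl
          (fun res r => if Qb col r then PySem.Set.add res (r, j) else res) acc := by
    apply PySem.List.foldl_congr_mem
    intro q i _
    simp only [fenetreOk_eq_wOk, Qb, hcoldef]
  rw [hB]
  have hS := scanEq j col col 0 (by simp) (Or.inl rfl) acc
  rw [hclen] at hS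
  simpa using hS
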